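-- pv_equiv track=rewrite | github.com/kovidgoyal/calibre | src/calibre/db/cli/cmd_list.py | prepare_output_table
-- ===== SOURCE A (Python) =====
-- def prepare_output_table(fields, book_ids, data, metadata):
--     ans = []
--     for book_id in book_ids:
--         row = []
--         ans.append(row)
--         for field in fields:
--             if field == 'id':
--                 row.append(str(book_id))
--                 continue
--             val = data.get(field.replace('*', '#'), {}).get(book_id)
--             row.append(str(val).replace('\n', ' '))
--     return ans
-- ===== SOURCE B (Python) =====
-- def prepare_output_table(fields, book_ids, data, metadata):
--     ans = [[] for _ in book_ids]
--     for field in fields: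
--         if field == 'id':
--             for row, book_id in zip(ans, book_ids):
--                 row.append(str(book_id))
--         else:
--             sub = data.get(field.replace('*', '#'), {})
--             for row, book_id in zip(ans, book_ids):
--                 row.append(str(sub.get(book_id)).replace('\n', ' '))
--     return ans
-- ===== Notes on version B (the rewrite author's own statement) =====
-- stated objective: alternative
-- what changed: B pre-allocates one empty row per book and fills the table column-by-column, resolving each field's sub-dictionary once per field instead of once per cell in A's row-major sweep.
import Mathlib
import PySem

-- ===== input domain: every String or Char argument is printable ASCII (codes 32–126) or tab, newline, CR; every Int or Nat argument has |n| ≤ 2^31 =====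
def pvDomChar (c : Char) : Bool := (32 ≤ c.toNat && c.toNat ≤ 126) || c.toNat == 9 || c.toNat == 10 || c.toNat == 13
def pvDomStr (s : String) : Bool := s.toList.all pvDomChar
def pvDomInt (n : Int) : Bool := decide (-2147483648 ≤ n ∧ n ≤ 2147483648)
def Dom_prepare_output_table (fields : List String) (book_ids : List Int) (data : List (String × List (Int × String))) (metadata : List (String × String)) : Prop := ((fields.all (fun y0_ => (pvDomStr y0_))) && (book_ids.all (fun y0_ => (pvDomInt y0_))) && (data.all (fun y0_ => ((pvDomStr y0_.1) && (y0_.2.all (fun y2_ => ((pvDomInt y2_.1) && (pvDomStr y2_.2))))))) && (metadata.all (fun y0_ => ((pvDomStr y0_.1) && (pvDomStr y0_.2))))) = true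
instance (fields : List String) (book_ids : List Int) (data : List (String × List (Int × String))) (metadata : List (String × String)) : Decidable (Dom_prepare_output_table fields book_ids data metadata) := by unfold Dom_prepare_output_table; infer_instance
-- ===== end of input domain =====

-- B fills the table column-by-column (outer loop over fields, one sub-dict lookup per field)
-- instead of A's row-major sweep; same return value, an alternative decomposition.

-- ===== PORT A =====
-- one cell of the table: str(val).replace('\n',' ') for val = data.get(field.replace('*','#'),{}).get(book_id)
def pvCellA (data : List (String × List (Int × String))) (field : String) (book_id : Int) : String :=
  let val := (PySem.Dict.mk ((PySem.Dict.mk data).getD (PySem.Str.replace field "*" "#") [])).get? book_id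
  PySem.Str.replace (match val with | none => "None" | some v => v) "\n" " "

def prepare_output_table (fields : List String) (book_ids : List Int) (data : List (String × List (Int × String))) (metadata : List (String × String)) : List (List String) :=
  book_ids.foldl (fun ans book_id =>
    ans ++ [fields.foldl (fun row field =>
      if field == "id" then row ++ [PySem.Int.toStr book_id]
      else row ++ [pvCellA data field book_id]) []]) []

-- ===== PORT B =====
def prepare_output_table_alt (fields : List String) (book_ids : List Int) (data : List (String × List (Int × String))) (metadata : List (String × String)) : List (List String) :=
  fields.foldl (fun ans field =>
    if field == "id" then
      List.zipWith (fun row book_id => row ++ [PySem.Int.toStr book_id]) ans book_ids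
    else
      let sub := (PySem.Dict.mk data).getD (PySem.Str.replace field "*" "#") []
      List.zipWith (fun row book_id =>
        row ++ [PySem.Str.replace (match (PySem.Dict.mk sub).get? book_id with | none => "None" | some v => v) "\n" " "]) ans book_ids)
    (book_ids.map (fun _ => []))

-- ===== PRECONDITION & SPEC =====
def Spec_prepare_output_table (fields : List String) (book_ids : List Int) (data : List (String × List (Int × String))) (metadata : List (String × String)) (out : List (List String)) : Prop := out = prepare_output_table_alt fields book_ids data metadata
instance (fields : List String) (book_ids : List Int) (data : List (String × List (Int × String))) (metadata : List (String × String)) (out : List (List String)) : Decidable (Spec_prepare_output_table fields book_ids data metadata out) := by unfold Spec_prepare_output_table; infer_instance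

-- ===== CLAIM (what is proved, stated in full; the proofs are below) =====
def Claim_equal_prepare_output_table : Prop := ∀ (fields : List String) (book_ids : List Int) (data : List (String × List (Int × String))) (metadata : List (String × String)), Dom_prepare_output_table fields book_ids data metadata → Spec_prepare_output_table fields book_ids data metadata (prepare_output_table fields book_ids data metadata)

-- ===== LEMMAS AND PROOFS =====

-- the common cell value (used only by the proofs)
def pvCell (data : List (String × List (Int × String))) (field : String) (book_id : Int) : String :=
  if field == "id" then PySem.Int.toStr book_id else pvCellA data field book_id

-- A's inner row loop is the common cell map
theorem pvA_row (data : List (String × List (Int × String))) (book_id : Int) (fields : List String) (acc : List String) :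
    fields.foldl (fun row field =>
      if field == "id" then row ++ [PySem.Int.toStr book_id]
      else row ++ [pvCellA data field book_id]) acc
      = acc ++ fields.map (fun f => pvCell data f book_id) := by
  induction fields generalizing acc with
  | nil => simp
  | cons f fs ih =>
    rw [List.foldl_cons]
    by_cases h : f == "id"
    · rw [if_pos h, ih]
      have he : f = "id" := by simpa using h
      subst he; simp [pvCell]
    · rw [if_neg h, ih]
      have he : ¬ f = "id" := by simpa using h
      simp [pvCell, he]

-- A is the row-major table
theorem pvA_eq (fields : List String) (book_ids : List Int) (data : List (String × List (Int × String))) (metadata : List (String × String)) :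
    prepare_output_table fields book_ids data metadata
      = book_ids.map (fun b => fields.map (fun f => pvCell data f b)) := by
  unfold prepare_output_table
  have h : ∀ (bs : List Int) (acc : List (List String)),
      bs.foldl (fun ans book_id =>
        ans ++ [fields.foldl (fun row field =>
          if field == "id" then row ++ [PySem.Int.toStr book_id]
          else row ++ [pvCellA data field book_id]) []]) acc
        = acc ++ bs.map (fun b => fields.map (fun f => pvCell data f b)) := by
    intro bs
    induction bs with
    | nil => simp
    | cons b bs ih =>
      intro acc
      rw [List.foldl_cons, ih, pvA_row data b fields []]
      simp
  simpa using h book_ids []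

-- B's column step on a mapped table
theorem pv_zipWith_map {α : Type} (xs : List Int) (g : Int → List α) (h : Int → α) :
    List.zipWith (fun row b => row ++ [h b]) (xs.map g) xs
      = xs.map (fun b => g b ++ [h b]) := by
  induction xs with
  | nil => rfl
  | cons x xs ih => simp [ih]

-- B's fold over fields extends every row by the column of cells
theorem pvB_fold (book_ids : List Int) (data : List (String × List (Int × String))) :
    ∀ (fields : List String) (g : Int → List String),
      fields.foldl (fun ans field =>
        if field == "id" then
          List.zipWith (fun row book_id => row ++ [PySem.Int.toStr book_id]) ans book_ids
        else
          let sub := (PySem.Dict.mk data).getD (PySem.Str.replace field "*" "#") []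
          List.zipWith (fun row book_id =>
            row ++ [PySem.Str.replace (match (PySem.Dict.mk sub).get? book_id with | none => "None" | some v => v) "\n" " "]) ans book_ids)
        (book_ids.map g)
      = book_ids.map (fun b => g b ++ fields.map (fun f => pvCell data f b)) := by
  intro fields
  induction fields with
  | nil => intro g; simp
  | cons f fs ih =>
    intro g
    rw [List.foldl_cons]
    by_cases h : f == "id"
    · rw [if_pos h, pv_zipWith_map book_ids g (fun b => PySem.Int.toStr b)]
      have hf : (fun b => g b ++ [PySem.Int.toStr b]) = fun b => g b ++ [pvCell data f b] := by
        funext b; simp [pvCell, h]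
      rw [hf, ih]
      simp
    · rw [if_neg h]
      dsimp only
      rw [pv_zipWith_map book_ids g]
      have hf : (fun b => g b ++ [PySem.Str.replace (match (PySem.Dict.mk ((PySem.Dict.mk data).getD (PySem.Str.replace f "*" "#") [])).get? b with | none => "None" | some v => v) "\n" " "])
          = fun b => g b ++ [pvCell data f b] := by
        funext b; simp [pvCell, h, pvCellA]
      rw [hf, ih]
      simp

-- ===== VERDICT (by name: the statement is the Claim_ definition above) =====
theorem prepare_output_table_spec : Claim_equal_prepare_output_table := by
  intro fields book_ids data metadata _
  unfold Spec_prepare_output_table prepare_output_table_alt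
  rw [pvA_eq fields book_ids data metadata, pvB_fold book_ids data fields (fun _ => [])]
  simp
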